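-- pv_equiv track=rewrite | github.com/TheNoiy11/2016-Python | Q5.py | three_answers
-- ===== SOURCE A (Python) =====
-- def three_answers(fulllist):
-- 	if len(fulllist) == 0:
-- 		return(0,0,0)
-- 	elif fulllist[0] % 2 == 0:
-- 		if fulllist[0] == 0:
-- 			even,odd,zctr = three_answers(fulllist[1:])
-- 			return (even, odd,zctr+1)
-- 		else:
-- 			even,odd,zctr = three_answers(fulllist[1:])
-- 			return (fulllist[0]+even, odd,zctr)
-- 	else:
-- 		even,odd,zctr = three_answers(fulllist[1:])
-- 		return (even, fulllist[0]+odd,zctr)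
-- ===== SOURCE B (Python) =====
-- def three_answers(fulllist):
--     even = odd = zctr = 0
--     for x in fulllist:
--         if x == 0:
--             zctr += 1
--         elif x % 2 == 0:
--             even += x
--         else:
--             odd += x
--     return (even, odd, zctr)
-- ===== Notes on version B (the rewrite author's own statement) =====
-- stated objective: simpler
-- what changed: Replaces the recursive tail-slice decomposition (which rebuilds fulllist[1:] at each step and hits Python's recursion limit on long lists) with a single iterative loop over three accumulators.
import Mathlib
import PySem

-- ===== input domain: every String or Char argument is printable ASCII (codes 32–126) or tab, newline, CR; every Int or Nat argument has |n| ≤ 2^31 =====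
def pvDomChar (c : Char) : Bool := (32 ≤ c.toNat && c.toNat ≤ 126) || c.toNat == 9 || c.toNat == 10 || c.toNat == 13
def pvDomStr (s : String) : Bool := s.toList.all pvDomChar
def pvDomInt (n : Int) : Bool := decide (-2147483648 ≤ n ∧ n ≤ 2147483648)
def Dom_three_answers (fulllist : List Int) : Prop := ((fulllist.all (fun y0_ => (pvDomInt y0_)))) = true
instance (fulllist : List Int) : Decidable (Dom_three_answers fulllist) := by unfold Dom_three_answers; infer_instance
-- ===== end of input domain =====

-- B replaces A's recursion on fulllist[1:] by one iterative pass with three accumulators (objective: simpler).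

-- ===== PORT A =====
-- literal transliteration of A's recursion on the tail slice
def three_answers (fulllist : List Int) : List Int :=
  match fulllist with
  | [] => [0, 0, 0]
  | x :: rest =>
    if PySem.Int.mod x 2 = 0 then
      if x = 0 then
        match three_answers rest with
        | [even, odd, zctr] => [even, odd, zctr + 1]
        | l => l
      else
        match three_answers rest with
        | [even, odd, zctr] => [x + even, odd, zctr]
        | l => l
    else
      match three_answers rest with
      | [even, odd, zctr] => [even, x + odd, zctr]
      | l => l

-- ===== PORT B =====
def pyStep (s : Int × Int × Int) (x : Int) : Int × Int × Int :=
  if x = 0 then (s.1, s.2.1, s.2.2 + 1)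
  else if PySem.Int.mod x 2 = 0 then (s.1 + x, s.2.1, s.2.2)
  else (s.1, s.2.1 + x, s.2.2)

def three_answers_alt (fulllist : List Int) : List Int :=
  let s := fulllist.foldl pyStep (0, 0, 0)
  [s.1, s.2.1, s.2.2]

-- ===== PRECONDITION & SPEC =====
def Spec_three_answers (fulllist : List Int) (out : List Int) : Prop := out = three_answers_alt fulllist
instance (fulllist : List Int) (out : List Int) : Decidable (Spec_three_answers fulllist out) := by unfold Spec_three_answers; infer_instance

-- ===== CLAIM (what is proved, stated in full; the proofs are below) =====
def Claim_equal_three_answers : Prop := ∀ (fulllist : List Int), Dom_three_answers fulllist → Spec_three_answers fulllist (three_answers fulllist)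

-- ===== LEMMAS AND PROOFS =====

lemma three_answers_shape (xs : List Int) :
    ∃ e o z : Int, three_answers xs = [e, o, z] := by
  induction xs with
  | nil => exact ⟨0, 0, 0, rfl⟩
  | cons x rest ih =>
    obtain ⟨e, o, z, h⟩ := ih
    by_cases hm : Int.fmod x 2 = 0 <;> by_cases hz : x = 0 <;>
      simp [three_answers, h, hm, hz, PySem.Int.mod]

lemma foldl_pyStep (xs : List Int) (e o z : Int) :
    ∀ e' o' z', three_answers xs = [e', o', z'] →
      xs.foldl pyStep (e, o, z) = (e + e', o + o', z + z') := by
  induction xs generalizing e o z with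
  | nil => intro e' o' z' h; simp [three_answers] at h; obtain ⟨h1, h2, h3⟩ := h; simp [h1.symm, h2.symm, h3.symm]
  | cons x rest ih =>
    intro e' o' z' h
    obtain ⟨a, b, c, hr⟩ := three_answers_shape rest
    by_cases hz : x = 0
    · simp [three_answers, hz, hr] at h
      obtain ⟨h1, h2, h3⟩ := h
      simp [List.foldl, pyStep, hz, ih e o (z+1) a b c hr, h1, h2, ← h3]
      ring_nf
    · by_cases hm : Int.fmod x 2 = 0
      · simp [three_answers, hz, hm, hr, PySem.Int.mod] at h
        obtain ⟨h1, h2, h3⟩ := h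
        simp [List.foldl, pyStep, hz, hm, ih (e+x) o z a b c hr, ← h1, h2, h3, PySem.Int.mod]
        ring_nf
      · simp [three_answers, hm, hr, PySem.Int.mod] at h
        obtain ⟨h1, h2, h3⟩ := h
        simp [List.foldl, pyStep, hz, hm, ih e (o+x) z a b c hr, h1, ← h2, h3, PySem.Int.mod]
        ring_nf

-- ===== VERDICT (by name: the statement is the Claim_ definition above) =====
theorem three_answers_spec : Claim_equal_three_answers := by
  intro xs _
  obtain ⟨e, o, z, h⟩ := three_answers_shape xs
  unfold Spec_three_answers three_answers_alt
  rw [h, foldl_pyStep xs 0 0 0 e o z h]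
  simp
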